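-- pv_equiv track=rewrite | github.com/sfad159357/aoi-ops-platform | services/spc-service/app/rules.py | _consecutive_same_side
-- ===== SOURCE A (Python) =====
-- def _consecutive_same_side(sides: list[int], run_length: int) -> list[int]:
--     """找出連續 run_length 個點都在同側的索引集合"""
--     result: list[int] = []
--     n = len(sides)
--     for start in range(n - run_length + 1):
--         window = sides[start:start + run_length]
--         if all(s == 1 for s in window) or all(s == -1 for s in window):
--             for i in range(start, start + run_length):
--                 if i not in result:
--                     result.append(i)
--     return result
-- ===== SOURCE B (Python) =====
-- def _consecutive_same_side(sides: list[int], run_length: int) -> list[int]: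
--     """Single pass: track the length of the current constant +1/-1 run and emit
--     each index as soon as it is known to lie in a qualifying window."""
--     if run_length < 1:
--         return []
--     result: list[int] = []
--     run = 0
--     prev = None
--     for i, s in enumerate(sides):
--         if s == 1 or s == -1:
--             run = run + 1 if s == prev else 1
--         else:
--             run = 0
--         prev = s
--         if run == run_length:
--             result.extend(range(i - run_length + 1, i + 1))
--         elif run > run_length:
--             result.append(i)
--     return result
-- ===== Notes on version B (the rewrite author's own statement) =====
-- stated objective: faster
-- what changed: Replaced the sliding-window rescan (every window re-sliced and every index searched in the result list) by a single pass that tracks the length of the current constant +1/-1 run and emits each qualifying index exactly once.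
import Mathlib
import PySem

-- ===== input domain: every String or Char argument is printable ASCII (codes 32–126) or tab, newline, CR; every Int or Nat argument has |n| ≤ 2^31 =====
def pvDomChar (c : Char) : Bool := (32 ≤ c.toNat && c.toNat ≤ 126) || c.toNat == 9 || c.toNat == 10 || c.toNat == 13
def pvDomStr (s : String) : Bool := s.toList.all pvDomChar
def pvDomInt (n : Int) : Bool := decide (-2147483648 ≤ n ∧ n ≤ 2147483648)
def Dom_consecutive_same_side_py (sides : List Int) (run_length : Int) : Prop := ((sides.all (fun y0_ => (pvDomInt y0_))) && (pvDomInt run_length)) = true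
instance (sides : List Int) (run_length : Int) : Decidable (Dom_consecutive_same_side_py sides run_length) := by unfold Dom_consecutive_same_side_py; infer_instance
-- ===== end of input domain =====

-- B replaces A's window-by-window rescans by one left-to-right pass tracking the current
-- constant +1/-1 run length (objective: faster; a timing run measures the speed-up).

-- ===== PORT A =====
def consecutive_same_side_py (sides : List Int) (run_length : Int) : List Int :=
  let n : Int := PySem.List.len sides
  (PySem.List.pyRange 0 (n - run_length + 1) 1).foldl
    (fun result start =>
      let window := PySem.List.slice sides (some start) (some (start + run_length))
      if window.all (fun s => s == 1) || window.all (fun s => s == -1) then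
        (PySem.List.pyRange start (start + run_length) 1).foldl
          (fun r i => if r.contains i then r else r ++ [i]) result
      else result) []

-- ===== PORT B =====
def consecutive_same_side_py_alt (sides : List Int) (run_length : Int) : List Int :=
  if run_length < 1 then []
  else
    ((PySem.List.enumerate sides).foldl
      (fun (st : List Int × Int × Option Int) (p : Int × Int) =>
        let result := st.1; let run := st.2.1; let prev := st.2.2
        let i := p.1; let s := p.2
        let run' : Int := if s == 1 || s == -1 then (if some s == prev then run + 1 else 1) else 0
        let result' :=
          if run' == run_length then result ++ PySem.List.pyRange (i - run_length + 1) (i + 1) 1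
          else if run_length < run' then result ++ [i]
          else result
        (result', run', some s))
      ([], 0, none)).1

-- ===== PRECONDITION & SPEC =====
def Spec_consecutive_same_side_py (sides : List Int) (run_length : Int) (out : List Int) : Prop := out = consecutive_same_side_py_alt sides run_length
instance (sides : List Int) (run_length : Int) (out : List Int) : Decidable (Spec_consecutive_same_side_py sides run_length out) := by unfold Spec_consecutive_same_side_py; infer_instance

-- ===== CLAIM (what is proved, stated in full; the proofs are below) =====
def Claim_equal_consecutive_same_side_py : Prop := ∀ (sides : List Int) (run_length : Int), Dom_consecutive_same_side_py sides run_length → Spec_consecutive_same_side_py sides run_length (consecutive_same_side_py sides run_length)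

-- ===== LEMMAS AND PROOFS =====

-- a window of length l starting at s is entirely +1 or entirely -1 (A's test)
def pvQual (sides : List Int) (l s : ℕ) : Bool :=
  ((sides.drop s).take l).all (fun x => x == 1) || ((sides.drop s).take l).all (fun x => x == -1)

-- i is covered by a qualifying window lying inside the prefix of length m
def pvCov (sides : List Int) (l m i : ℕ) : Prop :=
  ∃ s, s + l ≤ m ∧ pvQual sides l s = true ∧ s ≤ i ∧ i < s + l

def pvCovB (sides : List Int) (l m i : ℕ) : Bool :=
  (List.range m).any (fun s => pvQual sides l s && decide (s + l ≤ m) && decide (s ≤ i) && decide (i < s + l))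

-- canonical result: covered indices of the prefix of length m, ascending
def pvF (sides : List Int) (l m : ℕ) : List Int :=
  ((List.range sides.length).filter (fun i => pvCovB sides l m i)).map (fun (i : ℕ) => (i : Int))

-- length of the maximal constant ±1 run ending at position m-1 (B's `run` accumulator)
def pvStreak (sides : List Int) : ℕ → ℕ
  | 0 => 0
  | (m+1) =>
    let v := sides.getD m 0
    if v = 1 ∨ v = -1 then
      (if 0 < m ∧ sides.getD (m-1) 0 = v then pvStreak sides m + 1 else 1)
    else 0

def pvPrev (sides : List Int) (m : ℕ) : Option Int :=
  if m = 0 then none else some (sides.getD (m-1) 0)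

-- the last j elements of the prefix of length m are all equal and ±1
def pvSC (sides : List Int) (m j : ℕ) : Prop :=
  ∀ t, m - j ≤ t → t < m → (sides.getD t 0 = sides.getD (m-1) 0 ∧ (sides.getD t 0 = 1 ∨ sides.getD t 0 = -1))

lemma pvCovB_iff (sides : List Int) (l m i : ℕ) (hl : 1 ≤ l) :
    pvCovB sides l m i = true ↔ pvCov sides l m i := by
  unfold pvCovB pvCov
  simp only [List.any_eq_true, List.mem_range, Bool.and_eq_true, decide_eq_true_eq]
  constructor
  · rintro ⟨s, _, ⟨⟨hq, h1⟩, h2⟩, h3⟩; exact ⟨s, h1, hq, h2, h3⟩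
  · rintro ⟨s, h1, hq, h2, h3⟩; exact ⟨s, by omega, ⟨⟨hq, h1⟩, h2⟩, h3⟩

lemma pvDedup (xs R : List Int) (h : xs.Nodup) :
    xs.foldl (fun r i => if r.contains i then r else r ++ [i]) R
      = R ++ xs.filter (fun i => !R.contains i) := by
  induction xs generalizing R with
  | nil => simp
  | cons x xs ih =>
    rcases List.nodup_cons.mp h with ⟨hx, hnd⟩
    simp only [List.foldl_cons, List.filter_cons]
    by_cases hc : x ∈ R
    · have hcc : R.contains x = true := by simpa [List.contains_iff_mem] using hc
      rw [if_pos hcc, ih R hnd, hcc]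
      simp
    · have hcc : R.contains x = false := by simpa using hc
      rw [if_neg (by simpa using hc), ih _ hnd, hcc]
      have hf : xs.filter (fun i => !(R ++ [x]).contains i) = xs.filter (fun i => !R.contains i) := by
        apply List.filter_congr
        intro y hy
        have hyx : y ≠ x := fun e => hx (e ▸ hy)
        simp [hyx]
      rw [hf]
      simp

lemma pvSplit (n : ℕ) (p q : ℕ → Bool) (h : ∀ i j, p i = true → q j = true → i < j) :
    (List.range n).filter (fun i => p i || q i)
      = (List.range n).filter p ++ (List.range n).filter q := by
  induction n with
  | zero => simp
  | succ n ih =>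
    rw [List.range_succ]
    simp only [List.filter_append, List.filter_cons, List.filter_nil]
    rw [ih]
    by_cases hp : p n
    · have : (List.range n).filter q = [] := by
        rw [List.filter_eq_nil_iff]; intro j hj hqj
        exact absurd (h n j hp hqj) (by have := List.mem_range.mp hj; omega)
      have hqn : ¬ q n = true := fun hqn => absurd (h n n hp hqn) (by omega)
      simp [hp, hqn, this]
    · by_cases hq : q n
      · simp [hp, hq]
      · simp [hp, hq]

lemma pvWindowFilter (n a l : ℕ) (h : a + l ≤ n) (q : ℕ → Bool)
    (hq : ∀ i, q i = true → a ≤ i ∧ i < a + l) :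
    (List.range n).filter q = (List.range' a l).filter q := by
  have e1 : List.range' 0 a 1 ++ List.range' a l 1 = List.range' 0 (a+l) 1 := by
    have := @List.range'_append 0 a l 1; simpa using this
  have e2 : List.range' 0 (a+l) 1 ++ List.range' (a+l) (n-(a+l)) 1 = List.range' 0 n 1 := by
    have := @List.range'_append 0 (a+l) (n-(a+l)) 1; simp at this; rw [this]; congr 1; omega
  rw [List.range_eq_range', ← e2, ← e1]
  simp only [List.filter_append]
  have f1 : (List.range' 0 a).filter q = [] := by
    rw [List.filter_eq_nil_iff]; intro j hj hqj
    have := List.mem_range'_1.mp hj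
    have := hq j hqj; omega
  have f3 : (List.range' (a+l) (n-(a+l))).filter q = [] := by
    rw [List.filter_eq_nil_iff]; intro j hj hqj
    have := List.mem_range'_1.mp hj
    have := hq j hqj; omega
  simp [f1, f3]

lemma pvMemF (sides : List Int) (l m i : ℕ) (hi : i < sides.length) :
    (pvF sides l m).contains (i : Int) = pvCovB sides l m i := by
  rw [Bool.eq_iff_iff, List.contains_iff_mem]
  unfold pvF
  constructor
  · intro hmem
    obtain ⟨j, hj, he⟩ := List.mem_map.mp hmem
    obtain ⟨hjr, hjc⟩ := List.mem_filter.mp hj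
    have : j = i := by exact_mod_cast he
    rwa [this] at hjc
  · intro hc
    exact List.mem_map.mpr ⟨i, List.mem_filter.mpr ⟨List.mem_range.mpr hi, hc⟩, rfl⟩

lemma pvRangeCast (a l : ℕ) :
    PySem.List.pyRange (a : Int) ((a : Int) + (l : Int)) 1
      = (List.range' a l).map (fun (i : ℕ) => (i : Int)) := by
  rw [PySem.List.pyRange_one]
  have h1 : ((a:Int)+l-(a:Int)).toNat = l := by omega
  rw [h1, show (List.range' a l) = (List.range l).map (fun x => a + x) from List.range'_eq_map_range,
      List.map_map]
  apply List.map_congr_left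
  intro x hx
  simp

lemma pvStreak_le (sides : List Int) (m : ℕ) : pvStreak sides m ≤ m := by
  induction m with
  | zero => simp [pvStreak]
  | succ m ih =>
    unfold pvStreak; dsimp only; split_ifs <;> omega

lemma pvSC_succ (sides : List Int) (m j : ℕ) :
    pvSC sides (m+1) j ↔
      ∀ t, m + 1 - j ≤ t → t < m + 1 →
        (sides.getD t 0 = sides.getD m 0 ∧ (sides.getD t 0 = 1 ∨ sides.getD t 0 = -1)) := by
  unfold pvSC
  simp only [Nat.add_sub_cancel]

lemma pvWindowAll (sides : List Int) (l s : ℕ) (h : s + l ≤ sides.length) (c : Int) :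
    (((sides.drop s).take l).all (fun x => x == c) = true) ↔
      (∀ t, s ≤ t → t < s + l → sides.getD t 0 = c) := by
  rw [List.all_eq_true]
  have hlen : ((sides.drop s).take l).length = l := by
    simp [List.length_take, List.length_drop]; omega
  constructor
  · intro hall t h1 h2
    have ht : t - s < l := by omega
    have htl : t - s < ((sides.drop s).take l).length := by omega
    have hget : ((sides.drop s).take l)[t - s] = sides[t]'(by omega) := by
      simp [List.getElem_take, List.getElem_drop]
      congr 1
      omega
    have := hall _ (List.getElem_mem htl)
    rw [hget] at this
    rw [List.getD_eq_getElem sides 0 (by omega)]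
    exact eq_of_beq this
  · intro hc x hx
    obtain ⟨t, htl, he⟩ := List.mem_iff_getElem.mp hx
    have ht : t < l := by omega
    have hget : ((sides.drop s).take l)[t]'htl = sides[s + t]'(by omega) := by
      simp [List.getElem_take, List.getElem_drop]
    have := hc (s + t) (by omega) (by omega)
    rw [List.getD_eq_getElem sides 0 (by omega)] at this
    rw [← he, hget]
    exact beq_iff_eq.mpr this

lemma pvM (sides : List Int) (m j : ℕ) :
    j ≤ pvStreak sides m ↔ (j ≤ m ∧ pvSC sides m j) := by
  induction m generalizing j with
  | zero =>
    constructor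
    · intro h
      have : j = 0 := by have := pvStreak_le sides 0; omega
      subst this
      exact ⟨le_rfl, fun t h1 h2 => by omega⟩
    · rintro ⟨h, _⟩
      simpa [pvStreak] using h
  | succ m ih =>
    have hle := pvStreak_le sides m
    rw [pvSC_succ]
    unfold pvStreak; dsimp only
    by_cases hv : sides.getD m 0 = 1 ∨ sides.getD m 0 = -1
    · rw [if_pos hv]
      by_cases hp : 0 < m ∧ sides.getD (m-1) 0 = sides.getD m 0
      · rw [if_pos hp]
        match j with
        | 0 =>
          constructor
          · intro _; exact ⟨by omega, fun t h1 h2 => by omega⟩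
          · intro _; omega
        | (j+1) =>
          rw [Nat.add_le_add_iff_right, ih j]
          have hsc_m : pvSC sides m j ↔
              ∀ t, m - j ≤ t → t < m →
                (sides.getD t 0 = sides.getD (m-1) 0 ∧ (sides.getD t 0 = 1 ∨ sides.getD t 0 = -1)) := Iff.rfl
          constructor
          · rintro ⟨hjm, hsc⟩
            refine ⟨by omega, fun t h1 h2 => ?_⟩
            by_cases htm : t = m
            · subst htm; exact ⟨rfl, hv⟩
            · obtain ⟨he, hpm⟩ := hsc t (by omega) (by omega)
              exact ⟨by rw [he]; exact hp.2, hpm⟩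
          · rintro ⟨hjm, hsc⟩
            refine ⟨by omega, fun t h1 h2 => ?_⟩
            obtain ⟨he, hpm⟩ := hsc t (by omega) (by omega)
            refine ⟨?_, hpm⟩
            rw [he]
            exact hp.2.symm
      · rw [if_neg hp]
        constructor
        · intro hj
          refine ⟨by omega, fun t h1 h2 => ?_⟩
          have : t = m := by omega
          subst this
          exact ⟨rfl, hv⟩
        · rintro ⟨hjm, hsc⟩
          by_contra hcon
          have hj2 : 2 ≤ j := by omega
          have hm1 : 0 < m := by omega
          obtain ⟨he, _⟩ := hsc (m-1) (by omega) (by omega)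
          exact hp ⟨hm1, he⟩
    · rw [if_neg hv]
      constructor
      · intro hj
        have : j = 0 := by omega
        subst this
        exact ⟨by omega, fun t h1 h2 => by omega⟩
      · rintro ⟨hjm, hsc⟩
        by_contra hcon
        obtain ⟨_, hpm⟩ := hsc m (by omega) (by omega)
        exact hv hpm

lemma pvQual_iff (sides : List Int) (l s : ℕ) (h : s + l ≤ sides.length) :
    pvQual sides l s = true ↔
      ((∀ t, s ≤ t → t < s + l → sides.getD t 0 = 1) ∨
       (∀ t, s ≤ t → t < s + l → sides.getD t 0 = (-1 : Int))) := by
  unfold pvQual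
  rw [Bool.or_eq_true, pvWindowAll sides l s h 1, pvWindowAll sides l s h (-1)]

lemma pvQS (sides : List Int) (l s : ℕ) (hl : 1 ≤ l) (h : s + l ≤ sides.length) :
    pvQual sides l s = true ↔ l ≤ pvStreak sides (s + l) := by
  rw [pvQual_iff sides l s h, pvM]
  constructor
  · intro hq
    refine ⟨by omega, fun t h1 h2 => ?_⟩
    have h1' : s ≤ t := by omega
    rcases hq with hq | hq
    · have := hq t h1' h2
      have hlast := hq (s + l - 1) (by omega) (by omega)
      rw [this, hlast]
      exact ⟨rfl, Or.inl rfl⟩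
    · have := hq t h1' h2
      have hlast := hq (s + l - 1) (by omega) (by omega)
      rw [this, hlast]
      exact ⟨rfl, Or.inr rfl⟩
  · rintro ⟨hlm, hsc⟩
    have hv := hsc (s + l - 1) (by omega) (by omega)
    rcases hv.2 with h1 | h1
    · left
      intro t ht1 ht2
      obtain ⟨he, _⟩ := hsc t (by omega) (by omega)
      rw [he, ← h1, (hsc (s+l-1) (by omega) (by omega)).1]
    · right
      intro t ht1 ht2
      obtain ⟨he, _⟩ := hsc t (by omega) (by omega)
      rw [he, ← h1, (hsc (s+l-1) (by omega) (by omega)).1]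

-- run' = l exactly: no qualifying window inside the prefix of length m reaches index ≥ m+1-l
lemma pvNoOverlap (sides : List Int) (l m : ℕ) (hl : 1 ≤ l) (hm : m < sides.length)
    (hs : pvStreak sides (m+1) = l) :
    ∀ i, m + 1 - l ≤ i → ¬ pvCov sides l m i := by
  rintro i hi ⟨s, hsl, hq, hsi, hil⟩
  -- window [s, s+l) contains both m-l and m-l+1
  have hsm : s ≤ m - l := by omega
  have hlm : l ≤ m := by omega
  have h1 : m - l + 1 ≤ s + l - 1 := by omega
  -- from the streak: last l elements of prefix m+1 are constant
  have hscl : pvSC sides (m+1) l := ((pvM sides (m+1) l).mp (by omega)).2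
  rw [pvSC_succ] at hscl
  -- qual gives constancy on [s, s+l)
  rw [pvQual_iff sides l s (by omega)] at hq
  -- extend to pvSC (m+1) (l+1)
  have hext : pvSC sides (m+1) (l+1) := by
    rw [pvSC_succ]
    intro t ht1 ht2
    by_cases htl : m + 1 - l ≤ t
    · exact hscl t htl ht2
    · have html : t = m - l := by omega
      subst html
      have e1 : sides.getD (m - l) 0 = sides.getD (m - l + 1) 0 := by
        rcases hq with hq | hq
        · rw [hq (m-l) (by omega) (by omega), hq (m-l+1) (by omega) (by omega)]
        · rw [hq (m-l) (by omega) (by omega), hq (m-l+1) (by omega) (by omega)]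
      obtain ⟨e2, hpm⟩ := hscl (m - l + 1) (by omega) (by omega)
      rw [e1]
      exact ⟨e2, hpm⟩
  have := (pvM sides (m+1) (l+1)).mpr ⟨by omega, hext⟩
  omega

lemma pvPrevWin (sides : List Int) (l m : ℕ) (hl : 1 ≤ l) (hm : m < sides.length)
    (hs : l + 1 ≤ pvStreak sides (m+1)) :
    pvQual sides l (m - l) = true ∧ l ≤ m := by
  have hsc : pvSC sides (m+1) (l+1) := ((pvM sides (m+1) (l+1)).mp hs).2
  have hlm : l + 1 ≤ m + 1 := le_trans hs (pvStreak_le sides (m+1))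
  rw [pvSC_succ] at hsc
  refine ⟨?_, by omega⟩
  rw [pvQual_iff sides l (m-l) (by omega)]
  obtain ⟨_, hv⟩ := hsc m (by omega) (by omega)
  rcases hv with h1 | h1
  · left
    intro t ht1 ht2
    obtain ⟨he, _⟩ := hsc t (by omega) (by omega)
    rw [he, ← h1]
  · right
    intro t ht1 ht2
    obtain ⟨he, _⟩ := hsc t (by omega) (by omega)
    rw [he, ← h1]

lemma pvCovSucc (sides : List Int) (l m i : ℕ) (hl : 1 ≤ l) (hm : m < sides.length) :
    pvCov sides l (m+1) i ↔
      (pvCov sides l m i ∨ (l ≤ pvStreak sides (m+1) ∧ m + 1 - l ≤ i ∧ i ≤ m)) := by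
  constructor
  · rintro ⟨s, hsl, hq, hsi, hil⟩
    by_cases hsm : s + l ≤ m
    · exact Or.inl ⟨s, hsm, hq, hsi, hil⟩
    · have hse : s = m + 1 - l := by omega
      have hse' : s + l = m + 1 := by omega
      right
      refine ⟨?_, by omega, by omega⟩
      rw [← hse']
      exact (pvQS sides l s hl (by omega)).mp hq
  · rintro (⟨s, hsl, hq, hsi, hil⟩ | ⟨hst, h1, h2⟩)
    · exact ⟨s, by omega, hq, hsi, hil⟩
    · have hlm : l ≤ m + 1 := le_trans hst (pvStreak_le sides (m+1))
      refine ⟨m + 1 - l, by omega, ?_, by omega, by omega⟩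
      have : (m + 1 - l) + l = m + 1 := by omega
      rw [pvQS sides l (m+1-l) hl (by omega), this]
      exact hst

lemma pvEnumAppend (xs ys : List Int) (s : Int) :
    PySem.List.enumerate (xs ++ ys) s
      = PySem.List.enumerate xs s ++ PySem.List.enumerate ys (s + xs.length) := by
  induction xs generalizing s with
  | nil => simp [PySem.List.enumerate]
  | cons x xs ih =>
    simp only [List.cons_append, PySem.List.enumerate_cons, ih, List.length_cons]
    congr 2
    push_cast; ring


lemma pvF_empty (sides : List Int) (l m : ℕ) (hl : 1 ≤ l) (hm : m < l) :
    pvF sides l m = [] := by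
  unfold pvF
  rw [List.filter_eq_nil_iff.mpr, List.map_nil]
  intro i _ hc
  obtain ⟨s, hsl, _, _, _⟩ := (pvCovB_iff sides l m i hl).mp hc
  omega

lemma pvStepA (sides : List Int) (l k : ℕ) (hl : 1 ≤ l) (h : k + l ≤ sides.length)
    (hq : pvQual sides l k = true) :
    (List.range sides.length).filter (fun i => pvCovB sides l (k+l) i)
      = (List.range sides.length).filter (fun i => pvCovB sides l (k+l-1) i)
        ++ (List.range' k l).filter (fun i => !pvCovB sides l (k+l-1) i) := by
  have hcov : ∀ i, pvCovB sides l (k+l) i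
      = (pvCovB sides l (k+l-1) i || (decide (k ≤ i) && decide (i < k + l) && !pvCovB sides l (k+l-1) i)) := by
    intro i
    rw [Bool.eq_iff_iff]
    simp only [Bool.or_eq_true, Bool.and_eq_true, decide_eq_true_eq, Bool.not_eq_true']
    rw [pvCovB_iff sides l (k+l) i hl]
    constructor
    · rintro ⟨s, hsl, hqs, hsi, hil⟩
      by_cases hp : pvCovB sides l (k+l-1) i = true
      · exact Or.inl hp
      · have hs : s = k := by
          by_contra hne
          have hs2 : s + l ≤ k + l - 1 := by omega
          exact hp ((pvCovB_iff sides l (k+l-1) i hl).mpr ⟨s, hs2, hqs, hsi, hil⟩)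
        subst hs
        exact Or.inr ⟨⟨hsi, hil⟩, by simpa using hp⟩
    · rintro (hp | ⟨⟨h1, h2⟩, _⟩)
      · obtain ⟨s, hsl, hqs, hsi, hil⟩ := (pvCovB_iff sides l (k+l-1) i hl).mp hp
        exact ⟨s, by omega, hqs, hsi, hil⟩
      · exact ⟨k, le_rfl, hq, h1, h2⟩
  rw [List.filter_congr (fun i _ => hcov i)]
  rw [pvSplit sides.length _ _ ?pairwise]
  case pairwise =>
    intro i j hpi hqj
    simp only [Bool.and_eq_true, decide_eq_true_eq, Bool.not_eq_true'] at hqj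
    obtain ⟨⟨hj1, hj2⟩, hj3⟩ := hqj
    obtain ⟨s, hsl, hqs, hsi, hil⟩ := (pvCovB_iff sides l (k+l-1) i hl).mp hpi
    by_contra hij
    have hji : j ≤ i := by omega
    have : pvCovB sides l (k+l-1) j = true :=
      (pvCovB_iff sides l (k+l-1) j hl).mpr ⟨s, hsl, hqs, by omega, by omega⟩
    rw [this] at hj3
    simp at hj3
  congr 1
  rw [pvWindowFilter sides.length k l h _ ?support]
  case support =>
    intro i hqi
    simp only [Bool.and_eq_true, decide_eq_true_eq] at hqi
    exact ⟨hqi.1.1, hqi.1.2⟩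
  apply List.filter_congr
  intro i hi
  have := List.mem_range'_1.mp hi
  have d1 : decide (k ≤ i) = true := decide_eq_true (by omega)
  have d2 : decide (i < k + l) = true := decide_eq_true (by omega)
  rw [d1, d2]
  simp

lemma pvStepA0 (sides : List Int) (l k : ℕ) (hl : 1 ≤ l)
    (hq : pvQual sides l k = false) (i : ℕ) :
    pvCovB sides l (k+l) i = pvCovB sides l (k+l-1) i := by
  rw [Bool.eq_iff_iff, pvCovB_iff sides l (k+l) i hl, pvCovB_iff sides l (k+l-1) i hl]
  constructor
  · rintro ⟨s, hsl, hqs, hsi, hil⟩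
    have : s ≠ k := fun e => by rw [e, hq] at hqs; exact absurd hqs (by simp)
    have hsk : s < k ∨ s = k := by omega
    rcases hsk with hsk | hsk
    · exact ⟨s, by omega, hqs, hsi, hil⟩
    · exact absurd hsk this
  · rintro ⟨s, hsl, hqs, hsi, hil⟩
    exact ⟨s, by omega, hqs, hsi, hil⟩

lemma pvA_loop (sides : List Int) (l : ℕ) (hl : 1 ≤ l) :
    ∀ k : ℕ, k + l ≤ sides.length + 1 →
    (PySem.List.pyRange 0 (k : Int) 1).foldl
      (fun result start =>
        let window := PySem.List.slice sides (some start) (some (start + (l : Int)))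
        if window.all (fun s => s == 1) || window.all (fun s => s == -1) then
          (PySem.List.pyRange start (start + (l : Int)) 1).foldl
            (fun r i => if r.contains i then r else r ++ [i]) result
        else result) []
     = pvF sides l (k + l - 1) := by
  intro k
  induction k with
  | zero =>
    intro _
    rw [PySem.List.pyRange_one_eq_nil (by norm_num), List.foldl_nil,
        pvF_empty sides l (0 + l - 1) hl (by omega)]
  | succ k ih =>
    intro hk
    have hkl : k + l ≤ sides.length := by omega
    have hc1 : ((k+1 : ℕ) : Int) = (k : Int) + 1 := by push_cast; ring
    rw [hc1, PySem.List.pyRange_one_succ_right (by positivity), List.foldl_append,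
        ih (by omega), List.foldl_cons, List.foldl_nil]
    simp only []
    rw [PySem.List.slice_natCast_add sides k l]
    by_cases hq : pvQual sides l k = true
    · rw [if_pos (by exact hq)]
      rw [pvDedup _ _ (PySem.List.nodup_pyRange_one _ _), pvRangeCast k l, List.filter_map]
      have hfc : (List.range' k l).filter
            ((fun i => !(pvF sides l (k + l - 1)).contains i) ∘ (fun (i : ℕ) => (i : Int)))
          = (List.range' k l).filter (fun i => !pvCovB sides l (k+l-1) i) := by
        apply List.filter_congr
        intro i hi
        have hb := List.mem_range'_1.mp hi
        simp only [Function.comp]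
        rw [pvMemF sides l (k+l-1) i (by omega)]
      rw [hfc]
      unfold pvF
      rw [← List.map_append]
      congr 1
      have e : k + 1 + l - 1 = k + l := by omega
      rw [e, pvStepA sides l k hl hkl hq]
    · rw [if_neg (by exact hq)]
      unfold pvF
      have e : k + 1 + l - 1 = k + l := by omega
      rw [e]
      congr 1
      apply List.filter_congr
      intro i _
      exact (pvStepA0 sides l k hl (by simpa using hq) i).symm

lemma pvA_eq (sides : List Int) (l : ℕ) (hl : 1 ≤ l) :
    consecutive_same_side_py sides (l : Int) = pvF sides l sides.length := by
  show (PySem.List.pyRange 0 (PySem.List.len sides - (l : Int) + 1) 1).foldl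
      (fun result start =>
        let window := PySem.List.slice sides (some start) (some (start + (l : Int)))
        if window.all (fun s => s == 1) || window.all (fun s => s == -1) then
          (PySem.List.pyRange start (start + (l : Int)) 1).foldl
            (fun r i => if r.contains i then r else r ++ [i]) result
        else result) []
    = pvF sides l sides.length
  rw [PySem.List.len_eq]
  by_cases hln : l ≤ sides.length
  · have e : (sides.length : Int) - (l : Int) + 1 = ((sides.length - l + 1 : ℕ) : Int) := by omega
    rw [e, pvA_loop sides l hl (sides.length - l + 1) (by omega)]
    congr 1
    omega
  · rw [PySem.List.pyRange_one_eq_nil (by omega), List.foldl_nil]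
    exact (pvF_empty sides l sides.length hl (by omega)).symm


lemma pvStepB1 (sides : List Int) (l m : ℕ) (hl : 1 ≤ l) (hm : m < sides.length)
    (hs : pvStreak sides (m+1) = l) :
    (List.range sides.length).filter (fun i => pvCovB sides l (m+1) i)
      = (List.range sides.length).filter (fun i => pvCovB sides l m i)
        ++ List.range' (m+1-l) l := by
  have hlm : l ≤ m + 1 := hs ▸ pvStreak_le sides (m+1)
  have hcov : ∀ i, pvCovB sides l (m+1) i
      = (pvCovB sides l m i || (decide (m+1-l ≤ i) && decide (i < m+1))) := by
    intro i
    rw [Bool.eq_iff_iff]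
    simp only [Bool.or_eq_true, Bool.and_eq_true, decide_eq_true_eq]
    rw [pvCovB_iff sides l (m+1) i hl, pvCovB_iff sides l m i hl,
        pvCovSucc sides l m i hl hm, hs]
    constructor
    · rintro (hc | ⟨_, h1, h2⟩)
      · exact Or.inl hc
      · exact Or.inr ⟨h1, by omega⟩
    · rintro (hc | ⟨h1, h2⟩)
      · exact Or.inl hc
      · exact Or.inr ⟨le_rfl, h1, by omega⟩
  rw [List.filter_congr (fun i _ => hcov i)]
  rw [pvSplit sides.length _ _ ?pairwise]
  case pairwise =>
    intro i j hpi hqj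
    simp only [Bool.and_eq_true, decide_eq_true_eq] at hqj
    have hni := pvNoOverlap sides l m hl hm hs i
    by_contra hij
    have : m + 1 - l ≤ i := by omega
    exact hni this ((pvCovB_iff sides l m i hl).mp hpi)
  congr 1
  rw [pvWindowFilter sides.length (m+1-l) l (by omega) _ ?support]
  case support =>
    intro i hqi
    simp only [Bool.and_eq_true, decide_eq_true_eq] at hqi
    exact ⟨hqi.1, by omega⟩
  rw [List.filter_eq_self.mpr]
  intro a ha
  have := List.mem_range'_1.mp ha
  simp only [Bool.and_eq_true, decide_eq_true_eq]
  omega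

lemma pvStepB2 (sides : List Int) (l m : ℕ) (hl : 1 ≤ l) (hm : m < sides.length)
    (hs : l + 1 ≤ pvStreak sides (m+1)) :
    (List.range sides.length).filter (fun i => pvCovB sides l (m+1) i)
      = (List.range sides.length).filter (fun i => pvCovB sides l m i) ++ [m] := by
  obtain ⟨hqp, hlm⟩ := pvPrevWin sides l m hl hm hs
  have hcov : ∀ i, pvCovB sides l (m+1) i
      = (pvCovB sides l m i || decide (i = m)) := by
    intro i
    rw [Bool.eq_iff_iff]
    simp only [Bool.or_eq_true, decide_eq_true_eq]
    rw [pvCovB_iff sides l (m+1) i hl, pvCovB_iff sides l m i hl,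
        pvCovSucc sides l m i hl hm]
    constructor
    · rintro (hc | ⟨_, h1, h2⟩)
      · exact Or.inl hc
      · by_cases him : i = m
        · exact Or.inr him
        · exact Or.inl ⟨m - l, by omega, hqp, by omega, by omega⟩
    · rintro (hc | him)
      · exact Or.inl hc
      · exact Or.inr ⟨by omega, by omega, by omega⟩
  rw [List.filter_congr (fun i _ => hcov i)]
  rw [pvSplit sides.length _ _ ?pairwise]
  case pairwise =>
    intro i j hpi hqj
    simp only [decide_eq_true_eq] at hqj
    obtain ⟨s, h1, _, _, h4⟩ := (pvCovB_iff sides l m i hl).mp hpi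
    omega
  congr 1
  rw [pvWindowFilter sides.length m 1 (by omega) _ ?support]
  case support =>
    intro i hqi
    simp only [decide_eq_true_eq] at hqi
    omega
  rw [List.range'_one, List.filter_eq_self.mpr]
  intro a ha
  simp only [List.mem_singleton] at ha
  simp [ha]

lemma pvStepB0 (sides : List Int) (l m : ℕ) (hl : 1 ≤ l) (hm : m < sides.length)
    (hs : pvStreak sides (m+1) < l) (i : ℕ) :
    pvCovB sides l (m+1) i = pvCovB sides l m i := by
  rw [Bool.eq_iff_iff, pvCovB_iff sides l (m+1) i hl, pvCovB_iff sides l m i hl,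
      pvCovSucc sides l m i hl hm]
  constructor
  · rintro (hc | ⟨hst, _, _⟩)
    · exact hc
    · omega
  · exact Or.inl

lemma pvB_loop (sides : List Int) (l : ℕ) (hl : 1 ≤ l) :
    ∀ m, m ≤ sides.length →
    (PySem.List.enumerate (sides.take m)).foldl
      (fun (st : List Int × Int × Option Int) (p : Int × Int) =>
        let result := st.1; let run := st.2.1; let prev := st.2.2
        let i := p.1; let s := p.2
        let run' : Int := if s == 1 || s == -1 then (if some s == prev then run + 1 else 1) else 0
        let result' :=
          if run' == (l : Int) then result ++ PySem.List.pyRange (i - (l : Int) + 1) (i + 1) 1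
          else if (l : Int) < run' then result ++ [i]
          else result
        (result', run', some s))
      ([], 0, none)
    = (pvF sides l m, (pvStreak sides m : Int), pvPrev sides m) := by
  intro m
  induction m with
  | zero =>
    intro _
    rw [List.take_zero]
    rw [show PySem.List.enumerate ([] : List Int) 0 = [] from rfl, List.foldl_nil,
        pvF_empty sides l 0 hl (by omega)]
    simp [pvStreak, pvPrev]
  | succ m ih =>
    intro hm1
    have hm : m < sides.length := by omega
    have ht : sides.take (m+1) = sides.take m ++ [sides[m]] := by
      rw [← List.take_concat_get hm, List.concat_eq_append]
    rw [ht, pvEnumAppend, List.foldl_append, ih (by omega)]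
    have hlen : ((sides.take m).length : Int) = (m : Int) := by
      rw [List.length_take]; congr 1; omega
    rw [hlen]
    have e0 : (0 : Int) + (m : Int) = (m : Int) := by ring
    rw [e0]
    rw [show PySem.List.enumerate [sides[m]] (m : Int) = [((m : Int), sides[m])] from rfl]
    rw [List.foldl_cons, List.foldl_nil]
    simp only []
    have hgetD : sides.getD m 0 = sides[m] := List.getD_eq_getElem sides 0 hm
    have hstreak_succ : pvStreak sides (m+1)
        = if sides[m] = 1 ∨ sides[m] = -1 then
            (if 0 < m ∧ sides.getD (m-1) 0 = sides[m] then pvStreak sides m + 1 else 1)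
          else 0 := by
      conv_lhs => rw [pvStreak]
      rw [hgetD]
    have hrun : (if sides[m] == 1 || sides[m] == -1 then
          (if some sides[m] == pvPrev sides m then ((pvStreak sides m : Int)) + 1 else 1)
        else 0) = ((pvStreak sides (m+1) : ℕ) : Int) := by
      by_cases hA : sides[m] = 1 ∨ sides[m] = -1
      · have hbA : (sides[m] == 1 || sides[m] == -1) = true := by
          rcases hA with h | h <;> simp [h]
        rw [hbA, if_pos rfl]
        by_cases hB : 0 < m ∧ sides.getD (m-1) 0 = sides[m]
        · have hprev : pvPrev sides m = some sides[m] := by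
            unfold pvPrev; rw [if_neg (by omega), hB.2]
          have hbB : (some sides[m] == pvPrev sides m) = true := by rw [hprev]; simp
          rw [hbB, if_pos rfl, hstreak_succ, if_pos hA, if_pos hB]
          push_cast; ring
        · have hbB : (some sides[m] == pvPrev sides m) = false := by
            unfold pvPrev
            by_cases hm0 : m = 0
            · rw [if_pos hm0]; rfl
            · rw [if_neg hm0]
              simp only [beq_eq_false_iff_ne, ne_eq, Option.some.injEq]
              exact fun e => hB ⟨by omega, e.symm⟩
          rw [hbB, if_neg (by simp), hstreak_succ, if_pos hA, if_neg hB]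
          exact Nat.cast_one.symm
      · have h1 : sides[m] ≠ 1 := fun e => hA (Or.inl e)
        have h2 : sides[m] ≠ -1 := fun e => hA (Or.inr e)
        have hbA : (sides[m] == 1 || sides[m] == -1) = false := by simp [h1, h2]
        rw [hbA, if_neg (by simp), hstreak_succ, if_neg hA]
        exact Nat.cast_zero.symm
    rw [hrun]
    have hprev1 : pvPrev sides (m+1) = some sides[m] := by
      unfold pvPrev; rw [if_neg (Nat.succ_ne_zero m)]
      rw [show m + 1 - 1 = m from rfl, hgetD]
    rcases Nat.lt_trichotomy (pvStreak sides (m+1)) l with htr | htr | htr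
    · have hbeq : (((pvStreak sides (m+1) : ℕ) : Int) == (l : Int)) = false := by
        simp; omega
      rw [hbeq, if_neg (by simp), if_neg (by omega)]
      have hF : pvF sides l (m+1) = pvF sides l m := by
        unfold pvF; rw [List.filter_congr (fun i _ => pvStepB0 sides l m hl hm htr i)]
      rw [hprev1, hF]
    · have hbeq : (((pvStreak sides (m+1) : ℕ) : Int) == (l : Int)) = true := by
        simp [htr]
      rw [hbeq, if_pos rfl]
      have hlm1 : l ≤ m + 1 := htr ▸ pvStreak_le sides (m+1)
      have e1 : ((m : Int) - (l : Int) + 1) = ((m+1-l : ℕ) : Int) := by omega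
      have e2 : ((m : Int) + 1) = ((m+1-l : ℕ) : Int) + (l : Int) := by omega
      rw [e1, e2, pvRangeCast]
      have hF : pvF sides l (m+1)
          = pvF sides l m ++ (List.range' (m+1-l) l).map (fun (i : ℕ) => (i : Int)) := by
        unfold pvF; rw [pvStepB1 sides l m hl hm htr, List.map_append]
      rw [hprev1, hF]
    · have hbeq : (((pvStreak sides (m+1) : ℕ) : Int) == (l : Int)) = false := by
        simp; omega
      rw [hbeq, if_neg (by simp), if_pos (by omega)]
      have hF : pvF sides l (m+1) = pvF sides l m ++ [(m : Int)] := by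
        unfold pvF; rw [pvStepB2 sides l m hl hm htr, List.map_append]
        rfl
      rw [hprev1, hF]

lemma pvB_eq (sides : List Int) (l : ℕ) (hl : 1 ≤ l) :
    consecutive_same_side_py_alt sides (l : Int) = pvF sides l sides.length := by
  show (if (l : Int) < 1 then [] else
      ((PySem.List.enumerate sides).foldl
        (fun (st : List Int × Int × Option Int) (p : Int × Int) =>
          let result := st.1; let run := st.2.1; let prev := st.2.2
          let i := p.1; let s := p.2
          let run' : Int := if s == 1 || s == -1 then (if some s == prev then run + 1 else 1) else 0
          let result' :=
            if run' == (l : Int) then result ++ PySem.List.pyRange (i - (l : Int) + 1) (i + 1) 1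
            else if (l : Int) < run' then result ++ [i]
            else result
          (result', run', some s))
        ([], 0, none)).1)
    = pvF sides l sides.length
  rw [if_neg (by exact_mod_cast Nat.not_lt.mpr hl)]
  conv_lhs => rw [show sides = sides.take sides.length from (List.take_length).symm]
  rw [pvB_loop sides l hl sides.length le_rfl]

lemma pvA_trivial (sides : List Int) (run_length : Int) (h : run_length < 1) :
    consecutive_same_side_py sides run_length = [] := by
  show (PySem.List.pyRange 0 (PySem.List.len sides - run_length + 1) 1).foldl
      (fun result start =>
        let window := PySem.List.slice sides (some start) (some (start + run_length))
        if window.all (fun s => s == 1) || window.all (fun s => s == -1) then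
          (PySem.List.pyRange start (start + run_length) 1).foldl
            (fun r i => if r.contains i then r else r ++ [i]) result
        else result) []
    = []
  rw [PySem.List.foldl_congr_mem _ _ (fun acc _ => acc) []
      (by
        intro acc x hx
        simp only []
        rw [PySem.List.pyRange_one_eq_nil (show x + run_length ≤ x by omega), List.foldl_nil]
        split_ifs <;> rfl),
      PySem.List.foldl_ignore]

-- ===== VERDICT (by name: the statement is the Claim_ definition above) =====
theorem consecutive_same_side_py_spec : Claim_equal_consecutive_same_side_py := by
  intro sides run_length _
  unfold Spec_consecutive_same_side_py
  by_cases hr : run_length < 1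
  · rw [pvA_trivial sides run_length hr]
    unfold consecutive_same_side_py_alt
    rw [if_pos hr]
  · have hnn : (0:Int) ≤ run_length := by omega
    have hcast : ((run_length.toNat : Int)) = run_length := Int.toNat_of_nonneg hnn
    have hl : 1 ≤ run_length.toNat := by omega
    rw [← hcast, pvA_eq sides run_length.toNat hl, pvB_eq sides run_length.toNat hl]
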